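-- pv_equiv track=rewrite | github.com/Willgar/Advent-Of-Code-2021 | sonar_binary_3_2.py | least_common
-- ===== SOURCE A (Python) =====
-- def least_common(list, position):
--     i = 0
--     j = 0
--     remainders0=[]
--     remainders1=[]
--     for x in range(0, len(list)):
--         if "1" in list[x][position]:
--             remainders1.append(list[x])
--             i+=1
--         else:
--             remainders0.append(list[x])
--             j+=1
--     if i < j:
--         return remainders1
--     else:
--         return remainders0
-- ===== SOURCE B (Python) =====
-- def least_common(list, position):
--     # Stable-sort by the bit at `position` (False < True): zero-rows come first,
--     # each group in original order. Scan for the first one-row to find the split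
--     # point, then slice off the smaller side (tie -> the zero-side prefix).
--     srt = sorted(list, key=lambda x: "1" in x[position])
--     z = len(srt)
--     for i in range(len(srt)):
--         if "1" in srt[i][position]:
--             z = i
--             break
--     if len(srt) - z < z:
--         return srt[z:]
--     return srt[:z]
-- ===== Notes on version B (the rewrite author's own statement) =====
-- stated objective: alternative
-- what changed: B stable-sorts the rows by the boolean bit-at-position key (zeros first), scans for the first one-row to locate the split index, and returns a slice of the sorted list, instead of A's single-pass dual accumulation into two group lists with manual counters.
import Mathlib
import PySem

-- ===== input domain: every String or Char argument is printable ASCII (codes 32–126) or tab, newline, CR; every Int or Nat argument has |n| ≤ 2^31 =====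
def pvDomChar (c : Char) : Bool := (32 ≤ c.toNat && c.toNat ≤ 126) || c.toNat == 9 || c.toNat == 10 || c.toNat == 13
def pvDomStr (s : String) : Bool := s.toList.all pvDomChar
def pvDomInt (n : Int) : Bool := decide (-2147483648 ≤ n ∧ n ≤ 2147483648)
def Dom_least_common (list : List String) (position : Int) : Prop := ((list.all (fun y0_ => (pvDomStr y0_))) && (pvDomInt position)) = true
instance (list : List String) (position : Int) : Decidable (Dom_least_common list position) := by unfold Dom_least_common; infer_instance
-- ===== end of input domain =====

-- B stable-sorts by the bit key and slices off the smaller side instead of A's dual accumulation; same return value on all inputs where A returns (Pre_ excludes A's IndexError inputs).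

-- ===== PORT A =====
-- '"1" in x[position]': x[position] is the one-char string at a Python index, so the test is 'that char is '1''
def lcOne (position : Int) (s : String) : Bool :=
  (PySem.Str.pyGet? s position).any (fun c => c = '1')

-- loop body of A: appends to remainders1/remainders0 and bumps i/j; state = (i, j, remainders0, remainders1)
def lcStep (position : Int) (st : Int × Int × List String × List String) (s : String) :
    Int × Int × List String × List String :=
  if lcOne position s then
    (st.1 + 1, st.2.1, st.2.2.1, st.2.2.2 ++ [s])
  else
    (st.1, st.2.1 + 1, st.2.2.1 ++ [s], st.2.2.2)

def least_common (list : List String) (position : Int) : List String :=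
  let st := (PySem.List.pyRange 0 (PySem.List.len list) 1).foldl
    (fun st x => lcStep position st (PySem.List.pyGetD list x "")) (0, 0, [], [])
  if st.1 < st.2.1 then st.2.2.2 else st.2.2.1

-- ===== PORT B =====
-- Python's bool sort key (False < True) is ported as the Int key 0/1
def lcKey (position : Int) (s : String) : Int := if lcOne position s then 1 else 0

-- Source B's for-loop hunting the first one-row (z defaults to len when none is found)
def lcFirstOne (position : Int) : List String → Nat
  | [] => 0
  | s :: t => if lcOne position s then 0 else lcFirstOne position t + 1

def least_common_alt (list : List String) (position : Int) : List String :=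
  let srt := PySem.List.sorted list (lcKey position)
  let z := lcFirstOne position srt
  if (srt.length : Int) - (z : Int) < (z : Int) then
    PySem.List.slice srt (some (z : Int)) none       -- srt[z:]
  else
    PySem.List.slice srt none (some (z : Int))       -- srt[:z]

-- ===== PRECONDITION & SPEC =====
-- Pre_ excludes exactly the inputs where Python A raises IndexError: position must be a valid Python index into every string of the list.
def Pre_least_common (list : List String) (position : Int) : Prop :=
  ∀ s ∈ list, PySem.Raise.InRange s.toList.length position
instance (list : List String) (position : Int) : Decidable (Pre_least_common list position) := by
  unfold Pre_least_common; infer_instance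
def pvWitness_least_common : List String × Int := (["10", "01", "11"], 0)
def Spec_least_common (list : List String) (position : Int) (out : List String) : Prop := out = least_common_alt list position
instance (list : List String) (position : Int) (out : List String) : Decidable (Spec_least_common list position out) := by unfold Spec_least_common; infer_instance

-- ===== CLAIM (what is proved, stated in full; the proofs are below) =====
def Claim_equal_least_common : Prop := ∀ (list : List String) (position : Int), Dom_least_common list position → Pre_least_common list position → Spec_least_common list position (least_common list position)

-- ===== LEMMAS AND PROOFS =====

-- invariant of A's loop: running totals and both partial groups
theorem foldl_lcStep (position : Int) (l : List String) (i j : Int) (r0 r1 : List String) :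
    l.foldl (lcStep position) (i, j, r0, r1) =
      (i + l.countP (lcOne position),
       j + l.countP (fun s => !(lcOne position s)),
       r0 ++ l.filter (fun s => !(lcOne position s)),
       r1 ++ l.filter (lcOne position)) := by
  induction l generalizing i j r0 r1 with
  | nil => simp
  | cons s l ih =>
    by_cases h : lcOne position s = true
    · simp [lcStep, h, ih]
      omega
    · simp only [Bool.not_eq_true] at h
      simp [lcStep, h, ih]
      omega

-- inserting a zero-key row goes right after the zero block, before the one block
theorem insertBy_mid (position : Int) (x : String) (f0 f1 : List String)
    (hx : lcOne position x = false)
    (h0 : ∀ s ∈ f0, lcOne position s = false)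
    (h1 : ∀ s ∈ f1, lcOne position s = true) :
    PySem.List.insertBy (fun a b => decide (lcKey position a < lcKey position b)) x (f0 ++ f1)
      = f0 ++ x :: f1 := by
  induction f0 with
  | nil =>
    cases f1 with
    | nil => simp [PySem.List.insertBy]
    | cons b t =>
      have hb := h1 b (by simp)
      simp [PySem.List.insertBy, lcKey, hx, hb]
  | cons a f0 ih =>
    have ha := h0 a (by simp)
    have hrec := ih (fun s hs => h0 s (by simp [hs]))
    have hcond : decide (lcKey position x < lcKey position a) = false := by
      simp [lcKey, ha, hx]
    simp only [List.cons_append, PySem.List.insertBy, hcond, Bool.false_eq_true, if_false]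
    rw [hrec]

-- invariant of the insertion sort: acc stays 'zero block ++ one block', each in input order
theorem foldl_insertBy_partition (position : Int) (l f0 f1 : List String)
    (h0 : ∀ s ∈ f0, lcOne position s = false)
    (h1 : ∀ s ∈ f1, lcOne position s = true) :
    l.foldl (fun acc x => PySem.List.insertBy (fun a b => decide (lcKey position a < lcKey position b)) x acc) (f0 ++ f1)
      = (f0 ++ l.filter (fun s => !(lcOne position s))) ++ (f1 ++ l.filter (lcOne position)) := by
  induction l generalizing f0 f1 with
  | nil => simp
  | cons x l ih =>
    by_cases hx : lcOne position x = true
    · have : PySem.List.insertBy (fun a b => decide (lcKey position a < lcKey position b)) x (f0 ++ f1)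
          = (f0 ++ f1) ++ [x] := by
        apply PySem.List.insertBy_of_forall_not_before
        intro y hy
        simp only [lcKey, hx]
        rcases List.mem_append.mp hy with h | h
        · simp [h0 y h]
        · simp [h1 y h]
      have h1' : ∀ s ∈ f1 ++ [x], lcOne position s = true := by
        intro s hs
        rcases List.mem_append.mp hs with h | h
        · exact h1 s h
        · simp at h; simpa [h]
      simp only [List.foldl_cons, this, List.append_assoc]
      rw [ih f0 (f1 ++ [x]) h0 h1']
      simp [hx, List.filter_cons, List.append_assoc]
    · simp only [Bool.not_eq_true] at hx
      simp only [List.foldl_cons]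
      rw [insertBy_mid position x f0 f1 hx h0 h1]
      have := ih (f0 ++ [x]) f1 (by
        intro s hs
        rcases List.mem_append.mp hs with h | h
        · exact h0 s h
        · simp at h; simpa [h]) h1
      rw [show f0 ++ x :: f1 = (f0 ++ [x]) ++ f1 by simp] at *
      rw [this]
      simp [hx]

-- the stable sort by the 0/1 key is exactly 'zeros ++ ones'
theorem sorted_partition (position : Int) (l : List String) :
    PySem.List.sorted l (lcKey position)
      = l.filter (fun s => !(lcOne position s)) ++ l.filter (lcOne position) := by
  rw [PySem.List.sorted_eq_foldl_insertBy]
  have := foldl_insertBy_partition position l [] [] (by simp) (by simp)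
  simpa using this

-- the boundary scan finds the length of the zero block
theorem lcFirstOne_append (position : Int) (f0 f1 : List String)
    (h0 : ∀ s ∈ f0, lcOne position s = false)
    (h1 : ∀ s ∈ f1, lcOne position s = true) :
    lcFirstOne position (f0 ++ f1) = f0.length := by
  induction f0 with
  | nil =>
    cases f1 with
    | nil => simp [lcFirstOne]
    | cons b t => simp [lcFirstOne, h1 b (by simp)]
  | cons a f0 ih =>
    simp [lcFirstOne, h0 a (by simp), ih (fun s hs => h0 s (by simp [hs]))]

theorem least_common_spec : Claim_equal_least_common := by
  intro list position _ _
  unfold Spec_least_common least_common least_common_alt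
  dsimp only
  rw [PySem.List.foldl_pyRange_zero_pyGetD, foldl_lcStep, sorted_partition]
  dsimp only
  set F0 := list.filter (fun s => !(lcOne position s)) with hF0
  set F1 := list.filter (lcOne position) with hF1
  have hz : lcFirstOne position (F0 ++ F1) = F0.length := by
    refine lcFirstOne_append position F0 F1 ?_ ?_
    · intro s hs; have := List.of_mem_filter hs; simpa using this
    · intro s hs; exact List.of_mem_filter hs
  rw [hz]
  have hdrop : PySem.List.slice (F0 ++ F1) (some ((F0.length : Nat) : Int)) none = F1 := by
    rw [PySem.List.slice_from_natCast]; simp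
  have htake : PySem.List.slice (F0 ++ F1) none (some ((F0.length : Nat) : Int)) = F0 := by
    rw [PySem.List.slice_to_natCast]; simp
  rw [hdrop, htake]
  have hc0 : list.countP (fun s => !(lcOne position s)) = F0.length := by
    rw [hF0, List.countP_eq_length_filter]
  have hc1 : list.countP (lcOne position) = F1.length := by
    rw [hF1, List.countP_eq_length_filter]
  have hlen : (F0 ++ F1).length = F0.length + F1.length := by simp
  simp only [zero_add, List.nil_append, hc0, hc1, hlen]
  split_ifs with h1 h2 h2 <;> first | rfl | (exfalso; push_cast at *; omega)
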